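-- pv_equiv track=rewrite | github.com/dhruv-mangroliya/BTP_Phase_2 | temp.py | find_hetero_amino_acid_repeats
-- ===== SOURCE A (Python) =====
-- from collections import defaultdict
--
-- def find_hetero_amino_acid_repeats(sequence):
--     n = len(sequence)
--     freq = defaultdict(int)
--
--     # Iterate through all possible lengths of substrings (2 to N)
--     for length in range(2, n + 1):
--         # Use a sliding window to find substrings of this length
--         for i in range(n - length + 1):
--             substring = sequence[i:i + length]
--
--             # Check if all amino acids in the substring are different
--             if len(set(substring)) == len(substring):  # All amino acids are unique
--                 freq[substring] += 1
--
--     # Filter out repeats with frequency 1 or length 1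
--     return {repeat: count for repeat, count in freq.items() if len(repeat) > 1 and count > 1}
-- ===== SOURCE B (Python) =====
-- def find_hetero_amino_acid_repeats(sequence):
--     n = len(sequence)
--     # uniq[i] = length of the longest all-distinct prefix of sequence[i:]
--     uniq = []
--     for i in range(n):
--         seen = set()
--         j = i
--         while j < n and sequence[j] not in seen:
--             seen.add(sequence[j])
--             j += 1
--         uniq.append(j - i)
--     max_len = max(uniq, default=0)
--     freq = {}
--     # only lengths up to max_len can be all-distinct; uniqueness is a table lookup
--     for length in range(2, max_len + 1):
--         for i in range(n - length + 1):
--             if length <= uniq[i]: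
--                 s = sequence[i:i + length]
--                 freq[s] = freq.get(s, 0) + 1
--     return {s: c for s, c in freq.items() if c > 1}
-- ===== Notes on version B (the rewrite author's own statement) =====
-- stated objective: faster
-- what changed: B precomputes for each start index the length of the longest all-distinct prefix of that suffix (a one-pass scan with a seen-set per start), making A's per-substring set-building uniqueness test a table lookup, and bounds the outer substring-length loop by the maximum such length instead of n.
import Mathlib
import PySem

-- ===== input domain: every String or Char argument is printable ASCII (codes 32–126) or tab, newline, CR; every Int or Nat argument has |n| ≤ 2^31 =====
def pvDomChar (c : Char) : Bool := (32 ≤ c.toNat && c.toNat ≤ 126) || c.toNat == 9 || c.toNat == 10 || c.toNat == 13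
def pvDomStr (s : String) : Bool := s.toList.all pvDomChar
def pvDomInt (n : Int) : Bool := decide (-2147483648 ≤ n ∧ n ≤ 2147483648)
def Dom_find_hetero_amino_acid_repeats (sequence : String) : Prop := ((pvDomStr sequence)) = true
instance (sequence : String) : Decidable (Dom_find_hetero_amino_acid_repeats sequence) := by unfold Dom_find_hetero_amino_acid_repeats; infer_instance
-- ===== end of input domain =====

-- B replaces A's per-substring set-building uniqueness test (O(n^3)) by a precomputed table of
-- longest all-distinct prefix lengths and bounds the substring length by its maximum (objective: faster).

-- ===== PORT A =====
-- inner loop of A for one value of `length` (helper name; structure unchanged)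
def pvStepA (sequence : String) (n : Int) (freq : PySem.Dict String Int) (length : Int) : PySem.Dict String Int :=
  (PySem.List.pyRange 0 (n - length + 1)).foldl (fun freq i =>
    if PySem.Set.len (PySem.Set.ofList (PySem.Str.slice sequence (some i) (some (i + length))).toList) =
        PySem.Str.len (PySem.Str.slice sequence (some i) (some (i + length))) then
      freq.modify (PySem.Str.slice sequence (some i) (some (i + length))) 0 (· + 1)
    else freq) freq

def find_hetero_amino_acid_repeats (sequence : String) : List (String × Int) :=
  -- final dict comprehension: {repeat: count for ... if len(repeat) > 1 and count > 1}
  ((((PySem.List.pyRange 2 (PySem.Str.len sequence + 1)).foldl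
        (pvStepA sequence (PySem.Str.len sequence)) PySem.Dict.empty).items).foldl
    (fun d p => if 1 < PySem.Str.len p.1 ∧ 1 < p.2 then d.insert p.1 p.2 else d)
    PySem.Dict.empty).items

-- ===== PORT B =====
-- the while-loop of Source B: length of the longest prefix of `cs` whose chars are distinct and unseen
def pvUniqScan (seen : PySem.Set Char) : List Char → Int
  | [] => 0
  | c :: rest => if seen.contains c then 0 else 1 + pvUniqScan (seen.add c) rest

-- uniq[i] for i in range(n)
def pvUniq (sequence : String) : List Int :=
  (PySem.List.pyRange 0 (PySem.Str.len sequence)).map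
    (fun i => pvUniqScan PySem.Set.empty (sequence.toList.drop i.toNat))

-- inner loop of B for one value of `length`
def pvStepB (sequence : String) (n : Int) (uniq : List Int) (freq : PySem.Dict String Int)
    (length : Int) : PySem.Dict String Int :=
  (PySem.List.pyRange 0 (n - length + 1)).foldl (fun freq i =>
    if length ≤ PySem.List.pyGetD uniq i 0 then
      freq.insert (PySem.Str.slice sequence (some i) (some (i + length)))
        (freq.getD (PySem.Str.slice sequence (some i) (some (i + length))) 0 + 1)
    else freq) freq

def find_hetero_amino_acid_repeats_alt (sequence : String) : List (String × Int) :=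
  ((((PySem.List.pyRange 2 (PySem.List.maxD (pvUniq sequence) (fun x => x) 0 + 1)).foldl
        (pvStepB sequence (PySem.Str.len sequence) (pvUniq sequence)) PySem.Dict.empty).items).foldl
    (fun d p => if 1 < p.2 then d.insert p.1 p.2 else d) PySem.Dict.empty).items

-- ===== PRECONDITION & SPEC =====
def Spec_find_hetero_amino_acid_repeats (sequence : String) (out : List (String × Int)) : Prop := out = find_hetero_amino_acid_repeats_alt sequence
instance (sequence : String) (out : List (String × Int)) : Decidable (Spec_find_hetero_amino_acid_repeats sequence out) := by unfold Spec_find_hetero_amino_acid_repeats; infer_instance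

-- ===== CLAIM (what is proved, stated in full; the proofs are below) =====
def Claim_equal_find_hetero_amino_acid_repeats : Prop := ∀ (sequence : String), Dom_find_hetero_amino_acid_repeats sequence → Spec_find_hetero_amino_acid_repeats sequence (find_hetero_amino_acid_repeats sequence)

-- ===== LEMMAS AND PROOFS =====

-- a fold whose step never changes the accumulator is the identity
theorem pv_foldl_id {α β : Type} (l : List α) (f : β → α → β) (init : β)
    (h : ∀ acc, ∀ x ∈ l, f acc x = acc) : l.foldl f init = init := by
  induction l generalizing init with
  | nil => rfl
  | cons x xs ih =>
    simp only [List.foldl_cons, h init x (by simp)]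
    exact ih init (fun acc y hy => h acc y (List.mem_cons_of_mem x hy))

theorem pvUniqScan_nonneg (seen : PySem.Set Char) (cs : List Char) : 0 ≤ pvUniqScan seen cs := by
  induction cs generalizing seen with
  | nil => simp [pvUniqScan]
  | cons c rest ih =>
    simp only [pvUniqScan]
    split
    · exact le_refl 0
    · have := ih (seen.add c); omega

theorem pvUniqScan_le (seen : PySem.Set Char) (cs : List Char) :
    pvUniqScan seen cs ≤ (cs.length : Int) := by
  induction cs generalizing seen with
  | nil => simp [pvUniqScan]
  | cons c rest ih =>
    simp only [pvUniqScan, List.length_cons]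
    split
    · push_cast; omega
    · have := ih (seen.add c); push_cast; omega

-- characterisation of the while-loop: L ≤ scan ↔ the prefix of length L is distinct and unseen
theorem pvUniqScan_iff (seen : PySem.Set Char) (cs : List Char) (L : Nat) (hL : L ≤ cs.length) :
    ((L : Int) ≤ pvUniqScan seen cs ↔ (cs.take L).Nodup ∧ ∀ x ∈ cs.take L, ¬ x ∈ seen) := by
  induction cs generalizing seen L with
  | nil =>
    simp at hL; subst hL; simp [pvUniqScan]
  | cons c rest ih =>
    cases L with
    | zero => simp [pvUniqScan_nonneg]
    | succ L =>
      simp only [List.length_cons, Nat.succ_le_succ_iff] at hL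
      simp only [pvUniqScan, List.take_succ_cons, List.nodup_cons, List.mem_cons]
      by_cases hc : c ∈ seen
      · have : seen.contains c = true := (PySem.Set.contains_iff seen c).mpr hc
        simp only [this, if_true]
        constructor
        · intro h; exfalso; have := pvUniqScan_nonneg seen []; push_cast at h; omega
        · rintro ⟨-, h⟩; exact absurd hc (h c (by simp))
      · have : ¬ (seen.contains c = true) := fun h => hc ((PySem.Set.contains_iff seen c).mp h)
        simp only [this]
        have hiff := ih (seen.add c) L hL
        constructor
        · intro h
          have hle : (L : Int) ≤ pvUniqScan (seen.add c) rest := by push_cast at h ⊢; omega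
          obtain ⟨hnd, hmem⟩ := hiff.mp hle
          refine ⟨⟨fun hmem' => ?_, hnd⟩, fun x hx => ?_⟩
          · exact (hmem c hmem') (by simp [PySem.Set.mem_add])
          · rcases hx with rfl | hx
            · exact hc
            · intro hxs; exact (hmem x hx) (by simp [PySem.Set.mem_add, hxs])
        · rintro ⟨⟨hcnot, hnd⟩, hmem⟩
          have : (L : Int) ≤ pvUniqScan (seen.add c) rest := by
            refine hiff.mpr ⟨hnd, fun x hx => ?_⟩
            simp only [PySem.Set.mem_add]
            rintro (hxs | rfl)
            · exact hmem x (Or.inr hx) hxs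
            · exact hcnot hx
          push_cast at this ⊢; omega

theorem pv_ofList_sublist {α : Type} [BEq α] [LawfulBEq α] (xs : List α) :
    (PySem.Set.ofList xs : List α).Sublist xs := by
  induction xs with
  | nil => simp [PySem.Set.ofList_nil]
  | cons x xs ih =>
    rw [PySem.Set.ofList_cons]
    refine List.Sublist.cons₂ x ?_
    have h1 : ((PySem.Set.ofList xs).discard x).Sublist (PySem.Set.ofList xs : List α) := by
      rw [PySem.Set.discard.eq_1]; exact List.filter_sublist
    exact h1.trans ih

-- A's uniqueness test is exactly Nodup
theorem pv_set_len_iff (xs : List Char) :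
    (PySem.Set.len (PySem.Set.ofList xs) = (xs.length : Int)) ↔ xs.Nodup := by
  rw [PySem.Set.len_eq]
  constructor
  · intro h
    have hlen : (PySem.Set.ofList xs : List Char).length = xs.length := by exact_mod_cast h
    have := List.Sublist.eq_of_length (pv_ofList_sublist xs) hlen
    rw [← this]; exact PySem.Set.nodup_ofList xs
  · intro h
    rw [show (PySem.Set.ofList xs : List Char) = xs from PySem.Set.ofList_eq_self_of_nodup xs h]


-- the sliced substring, as a take/drop on the character list
theorem pv_sub_toList (sequence : String) (i L : Int) (hi : 0 ≤ i) (hL : 0 ≤ L) :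
    (PySem.Str.slice sequence (some i) (some (i + L))).toList =
      (sequence.toList.drop i.toNat).take L.toNat := by
  rw [PySem.Str.toList_slice, PySem.Chars.slice_eq_listSlice,
    PySem.List.slice_toNat _ hi (by omega)]
  have h : (i + L).toNat - i.toNat = L.toNat := by omega
  rw [h]

theorem pv_sub_len (sequence : String) (i L : Int) (hi : 0 ≤ i) (hL : 0 ≤ L)
    (hin : i ≤ (sequence.toList.length : Int) - L) :
    ((sequence.toList.drop i.toNat).take L.toNat).length = L.toNat := by
  simp only [List.length_take, List.length_drop]
  omega

-- uniq[i] is the scan of the i-th suffix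
theorem pv_uniq_get (sequence : String) (i : Int) (hi : 0 ≤ i)
    (hin : i < (sequence.toList.length : Int)) :
    PySem.List.pyGetD (pvUniq sequence) i 0 =
      pvUniqScan PySem.Set.empty (sequence.toList.drop i.toNat) := by
  unfold pvUniq
  rw [PySem.Str.len_eq]
  have hi' : i = ((i.toNat : Nat) : Int) := by omega
  rw [hi', PySem.List.pyGetD_map_pyRange _ _ _ _ (by omega : i.toNat < sequence.toList.length)]

-- A's per-substring uniqueness test agrees with B's table lookup
theorem pv_cond_iff (sequence : String) (L i : Int) (hL2 : 0 < L)
    (hi : 0 ≤ i) (hin : i ≤ (sequence.toList.length : Int) - L) :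
    ((PySem.Set.len (PySem.Set.ofList (PySem.Str.slice sequence (some i) (some (i + L))).toList) =
       PySem.Str.len (PySem.Str.slice sequence (some i) (some (i + L))))
     ↔ L ≤ PySem.List.pyGetD (pvUniq sequence) i 0) := by
  have hL : 0 ≤ L := le_of_lt hL2
  rw [pv_uniq_get sequence i hi (by omega), PySem.Str.len_eq,
    pv_sub_toList sequence i L hi hL]
  have hlen := pv_sub_len sequence i L hi hL hin
  rw [hlen]
  have hscan := pvUniqScan_iff PySem.Set.empty (sequence.toList.drop i.toNat) L.toNat
    (by simp only [List.length_drop]; omega)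
  have hmemempty : ∀ x ∈ (sequence.toList.drop i.toNat).take L.toNat, ¬ x ∈ PySem.Set.empty := by
    intro x _ hx
    rw [PySem.Set.empty_eq] at hx
    simp at hx
  have hiff := pv_set_len_iff ((sequence.toList.drop i.toNat).take L.toNat)
  rw [hlen] at hiff
  constructor
  · intro h
    have := hscan.mpr ⟨hiff.mp h, hmemempty⟩
    omega
  · intro h
    exact hiff.mpr (hscan.mp (by omega)).1

-- every table entry is at most the maximum B loops to
theorem pv_uniq_le_max (sequence : String) (i : Int) (hi : 0 ≤ i)
    (hin : i < (sequence.toList.length : Int)) :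
    PySem.List.pyGetD (pvUniq sequence) i 0 ≤
      PySem.List.maxD (pvUniq sequence) (fun x => x) 0 := by
  rw [pv_uniq_get sequence i hi hin]
  apply PySem.List.le_maxD_id
  unfold pvUniq
  rw [PySem.Str.len_eq]
  exact List.mem_map.mpr ⟨i, PySem.List.mem_pyRange_one.mpr ⟨hi, by omega⟩, rfl⟩

theorem pv_max_nonneg (sequence : String) :
    0 ≤ PySem.List.maxD (pvUniq sequence) (fun x => x) 0 := by
  rcases eq_or_ne (pvUniq sequence) [] with h | h
  · rw [h, PySem.List.maxD_nil]
  · have hmem := PySem.List.maxD_mem (pvUniq sequence) (fun x => x) 0 h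
    unfold pvUniq at hmem ⊢
    obtain ⟨j, -, hj⟩ := List.mem_map.mp hmem
    rw [← hj]
    exact pvUniqScan_nonneg _ _

theorem pv_max_le (sequence : String) :
    PySem.List.maxD (pvUniq sequence) (fun x => x) 0 ≤ (sequence.toList.length : Int) := by
  rcases eq_or_ne (pvUniq sequence) [] with h | h
  · rw [h, PySem.List.maxD_nil]; omega
  · have hmem := PySem.List.maxD_mem (pvUniq sequence) (fun x => x) 0 h
    unfold pvUniq at hmem ⊢
    obtain ⟨j, -, hj⟩ := List.mem_map.mp hmem
    rw [← hj]
    calc pvUniqScan PySem.Set.empty (sequence.toList.drop j.toNat)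
        ≤ ((sequence.toList.drop j.toNat).length : Int) := pvUniqScan_le _ _
      _ ≤ (sequence.toList.length : Int) := by simp only [List.length_drop]; omega

-- the two inner loops agree step for step
theorem pv_step_eq (sequence : String) (L : Int) (hL2 : 2 ≤ L) (d : PySem.Dict String Int) :
    pvStepA sequence (PySem.Str.len sequence) d L =
      pvStepB sequence (PySem.Str.len sequence) (pvUniq sequence) d L := by
  unfold pvStepA pvStepB
  apply PySem.List.foldl_congr_mem
  intro acc i hi
  rw [PySem.Str.len_eq] at hi ⊢
  obtain ⟨hi0, hi1⟩ := PySem.List.mem_pyRange_one.mp hi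
  exact if_congr (pv_cond_iff sequence L i (by omega) hi0 (by omega)) rfl rfl

-- for a length beyond the maximum, A's inner loop does nothing
theorem pv_step_id (sequence : String) (L : Int) (hL2 : 2 ≤ L)
    (hmax : PySem.List.maxD (pvUniq sequence) (fun x => x) 0 < L)
    (d : PySem.Dict String Int) :
    pvStepA sequence (PySem.Str.len sequence) d L = d := by
  unfold pvStepA
  apply pv_foldl_id
  intro acc i hi
  rw [PySem.Str.len_eq] at hi
  obtain ⟨hi0, hi1⟩ := PySem.List.mem_pyRange_one.mp hi
  rw [if_neg]
  intro hcond
  have := (pv_cond_iff sequence L i (by omega) hi0 (by omega)).mp hcond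
  have := pv_uniq_le_max sequence i hi0 (by omega)
  omega

-- key invariant through a dict-building fold
theorem pv_foldl_keys {α : Type} (P : String → Prop) (l : List α)
    (f : PySem.Dict String Int → α → PySem.Dict String Int) (d : PySem.Dict String Int)
    (hstep : ∀ d x, x ∈ l → ∀ k, k ∈ (f d x).keys → k ∈ d.keys ∨ P k)
    (hd : ∀ k ∈ d.keys, P k) : ∀ k ∈ (l.foldl f d).keys, P k := by
  induction l generalizing d with
  | nil => exact hd
  | cons x xs ih =>
    simp only [List.foldl_cons]
    apply ih
    · intro d' y hy k hk
      exact hstep d' y (List.mem_cons_of_mem x hy) k hk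
    · intro k hk
      rcases hstep d x (by simp) k hk with h | h
      · exact hd k h
      · exact h

-- every key B's frequency dict ever holds has length > 1
theorem pv_keys_long (sequence : String) :
    ∀ k ∈ ((PySem.List.pyRange 2 (PySem.List.maxD (pvUniq sequence) (fun x => x) 0 + 1)).foldl
      (pvStepB sequence (PySem.Str.len sequence) (pvUniq sequence)) PySem.Dict.empty).keys,
      1 < PySem.Str.len k := by
  apply pv_foldl_keys
  · intro d L hL k hk
    obtain ⟨hL2, hLb⟩ := PySem.List.mem_pyRange_one.mp hL
    have hLn : L ≤ (sequence.toList.length : Int) := le_trans (by omega) (pv_max_le sequence)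
    unfold pvStepB at hk
    refine pv_foldl_keys (fun k => k ∈ d.keys ∨ 1 < PySem.Str.len k) _ _ d ?_ (fun k hk => Or.inl hk) k hk
    intro d' i hi k hk
    rw [PySem.Str.len_eq] at hi
    obtain ⟨hi0, hi1⟩ := PySem.List.mem_pyRange_one.mp hi
    by_cases hc : L ≤ PySem.List.pyGetD (pvUniq sequence) i 0
    · rw [if_pos hc] at hk
      rcases (PySem.Dict.mem_keys_insert _ _ _ _).mp hk with rfl | hk
      · right; right
        rw [PySem.Str.len_eq, pv_sub_toList sequence i L hi0 (by omega),
          pv_sub_len sequence i L hi0 (by omega) (by omega)]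
        omega
      · left; exact hk
    · rw [if_neg hc] at hk
      left; exact hk
  · intro k hk
    rw [PySem.Dict.keys_empty] at hk
    simp at hk

-- ===== VERDICT (by name: the statement is the Claim_ definition above) =====
theorem find_hetero_amino_acid_repeats_spec : Claim_equal_find_hetero_amino_acid_repeats := by
  intro sequence _
  unfold Spec_find_hetero_amino_acid_repeats
  unfold find_hetero_amino_acid_repeats find_hetero_amino_acid_repeats_alt
  have hmax0 := pv_max_nonneg sequence
  have hmaxle := pv_max_le sequence
  have hfreq :
      (PySem.List.pyRange 2 (PySem.Str.len sequence + 1)).foldl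
          (pvStepA sequence (PySem.Str.len sequence)) PySem.Dict.empty =
        (PySem.List.pyRange 2 (PySem.List.maxD (pvUniq sequence) (fun x => x) 0 + 1)).foldl
          (pvStepB sequence (PySem.Str.len sequence) (pvUniq sequence)) PySem.Dict.empty := by
    rw [PySem.Str.len_eq]
    by_cases hml : 2 ≤ PySem.List.maxD (pvUniq sequence) (fun x => x) 0 + 1
    · rw [PySem.List.pyRange_one_append 2 (PySem.List.maxD (pvUniq sequence) (fun x => x) 0 + 1)
        ((sequence.toList.length : Int) + 1) hml (by omega), List.foldl_append]
      rw [pv_foldl_id _ _ _ (fun acc L hL => by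
        obtain ⟨h1, h2⟩ := PySem.List.mem_pyRange_one.mp hL
        have := pv_step_id sequence L (by omega) (by omega) acc
        rw [PySem.Str.len_eq] at this
        exact this)]
      apply PySem.List.foldl_congr_mem
      intro acc L hL
      obtain ⟨h1, h2⟩ := PySem.List.mem_pyRange_one.mp hL
      have := pv_step_eq sequence L h1 acc
      rw [PySem.Str.len_eq] at this
      exact this
    · have hB : PySem.List.pyRange 2 (PySem.List.maxD (pvUniq sequence) (fun x => x) 0 + 1) = [] := by
        rw [List.eq_nil_iff_forall_not_mem]
        intro x hx
        have := PySem.List.mem_pyRange_one.mp hx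
        omega
      rw [hB]
      apply pv_foldl_id
      intro acc L hL
      obtain ⟨h1, h2⟩ := PySem.List.mem_pyRange_one.mp hL
      have := pv_step_id sequence L h1 (by omega) acc
      rw [PySem.Str.len_eq] at this
      exact this
  rw [hfreq]
  congr 1
  apply PySem.List.foldl_congr_mem
  intro acc p hp
  have hkey := pv_keys_long sequence p.1 (PySem.Dict.mem_keys_of_mem_items _ hp)
  exact if_congr (by constructor <;> intro h <;> [exact h.2; exact ⟨hkey, h⟩]) rfl rfl
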